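-- pv_equiv track=rewrite | github.com/oriancm/arbitrage-stable | testnet_spot.py | convert_symbol_format
-- ===== SOURCE A (Python) =====
-- def convert_symbol_format(raw_symbol):
--     """Convert symbol format"""
--     if raw_symbol == 'FDUSDUSDC':
--         return 'FDUSD/USDC'
--     elif raw_symbol == 'USDCUSDT':
--         return 'USDC/USDT'
--     else:
--         for i in range(len(raw_symbol) - 1, 2, -1):
--             base = raw_symbol[:i]
--             quote = raw_symbol[i:]
--             if len(base) >= 2 and len(quote) >= 2:
--                 return f"{base}/{quote}"
--         return raw_symbol
-- ===== SOURCE B (Python) =====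
-- def convert_symbol_format(raw_symbol):
--     """Convert symbol format"""
--     if raw_symbol == 'FDUSDUSDC':
--         return 'FDUSD/USDC'
--     elif raw_symbol == 'USDCUSDT':
--         return 'USDC/USDT'
--     elif len(raw_symbol) >= 5:
--         return f"{raw_symbol[:-2]}/{raw_symbol[-2:]}"
--     else:
--         return raw_symbol
-- ===== Notes on version B (the rewrite author's own statement) =====
-- stated objective: simpler
-- what changed: Replaces the descending split-point scan with a closed-form slice: for len>=5 the first accepted split is always len-2, so B slices raw_symbol[:-2] and raw_symbol[-2:] directly; shorter strings are returned unchanged.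
import Mathlib
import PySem

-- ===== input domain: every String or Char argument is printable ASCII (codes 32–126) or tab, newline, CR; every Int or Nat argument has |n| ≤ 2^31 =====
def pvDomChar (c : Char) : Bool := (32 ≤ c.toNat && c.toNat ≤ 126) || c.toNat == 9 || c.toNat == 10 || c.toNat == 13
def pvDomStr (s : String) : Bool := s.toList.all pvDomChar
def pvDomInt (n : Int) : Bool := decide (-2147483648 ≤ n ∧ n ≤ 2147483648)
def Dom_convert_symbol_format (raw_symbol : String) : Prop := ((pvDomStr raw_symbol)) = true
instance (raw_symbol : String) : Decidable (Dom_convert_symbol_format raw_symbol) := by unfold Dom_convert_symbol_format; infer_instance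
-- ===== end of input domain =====

-- B replaces A's descending scan for the split point with the closed-form slice at len-2 (objective: simpler).

-- ===== PORT A =====
-- the for-loop of A: try each i from the range list, return base/quote at the first i whose parts both have length ≥ 2
def convertLoopA (orig : String) (s : List Char) : List Int → String
  | [] => orig
  | i :: rest =>
      let base := PySem.List.slice s none (some i)
      let quote := PySem.List.slice s (some i) none
      if 2 ≤ base.length ∧ 2 ≤ quote.length then String.ofList (base ++ '/' :: quote)
      else convertLoopA orig s rest

def convert_symbol_format (raw_symbol : String) : String :=
  if raw_symbol = "FDUSDUSDC" then "FDUSD/USDC"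
  else if raw_symbol = "USDCUSDT" then "USDC/USDT"
  else convertLoopA raw_symbol raw_symbol.toList
        (PySem.List.pyRange (PySem.Str.len raw_symbol - 1) 2 (-1))

-- ===== PORT B =====
def convert_symbol_format_alt (raw_symbol : String) : String :=
  if raw_symbol = "FDUSDUSDC" then "FDUSD/USDC"
  else if raw_symbol = "USDCUSDT" then "USDC/USDT"
  else if 5 ≤ PySem.Str.len raw_symbol then
    String.ofList (PySem.List.slice raw_symbol.toList none (some (-2)) ++
               '/' :: PySem.List.slice raw_symbol.toList (some (-2)) none)
  else raw_symbol

-- ===== PRECONDITION & SPEC =====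
def Spec_convert_symbol_format (raw_symbol : String) (out : String) : Prop := out = convert_symbol_format_alt raw_symbol
instance (raw_symbol : String) (out : String) : Decidable (Spec_convert_symbol_format raw_symbol out) := by unfold Spec_convert_symbol_format; infer_instance

-- ===== CLAIM (what is proved, stated in full; the proofs are below) =====
def Claim_equal_convert_symbol_format : Prop := ∀ (raw_symbol : String), Dom_convert_symbol_format raw_symbol → Spec_convert_symbol_format raw_symbol (convert_symbol_format raw_symbol)

-- ===== LEMMAS AND PROOFS =====

-- A's scan always settles at split point len-2 (when len ≥ 5), else falls through
theorem convertLoopA_closed (orig : String) (s : List Char) :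
    convertLoopA orig s (PySem.List.pyRange ((s.length : Int) - 1) 2 (-1)) =
      if 5 ≤ s.length then
        String.ofList (s.take (s.length - 2) ++ '/' :: s.drop (s.length - 2))
      else orig := by
  by_cases h5 : 5 ≤ s.length
  · rw [if_pos h5]
    have h1 : (2 : Int) < (s.length : Int) - 1 := by omega
    have h2 : (2 : Int) < (s.length : Int) - 1 - 1 := by omega
    rw [PySem.List.pyRange_neg_one_cons h1, PySem.List.pyRange_neg_one_cons h2]
    simp only [convertLoopA]
    rw [PySem.List.slice_to s (by omega : (0:Int) ≤ (s.length : Int) - 1),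
        PySem.List.slice_from s (by omega : (0:Int) ≤ (s.length : Int) - 1),
        PySem.List.slice_to s (by omega : (0:Int) ≤ (s.length : Int) - 1 - 1),
        PySem.List.slice_from s (by omega : (0:Int) ≤ (s.length : Int) - 1 - 1)]
    have ht1 : ((s.length : Int) - 1).toNat = s.length - 1 := by omega
    have ht2 : ((s.length : Int) - 1 - 1).toNat = s.length - 2 := by omega
    rw [ht1, ht2]
    rw [if_neg (by simp [List.length_take, List.length_drop]; omega)]
    rw [if_pos (by constructor <;> simp [List.length_take, List.length_drop] <;> omega)]
  · rw [if_neg h5]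
    by_cases h4 : s.length = 4
    · have h34 : PySem.List.pyRange ((s.length : Int) - 1) 2 (-1) = [3] := by
        rw [h4]; decide
      rw [h34]
      simp only [convertLoopA]
      rw [PySem.List.slice_to s (by omega : (0:Int) ≤ 3),
          PySem.List.slice_from s (by omega : (0:Int) ≤ 3)]
      exact if_neg (by simp [List.length_take, List.length_drop, h4])
    · have : PySem.List.pyRange ((s.length : Int) - 1) 2 (-1) = [] :=
        PySem.List.pyRange_neg_one_eq_nil (by omega)
      rw [this]
      rfl

-- ===== VERDICT (by name: the statement is the Claim_ definition above) =====
theorem convert_symbol_format_spec : Claim_equal_convert_symbol_format := by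
  intro raw _
  unfold Spec_convert_symbol_format convert_symbol_format convert_symbol_format_alt
  by_cases h1 : raw = "FDUSDUSDC"
  · simp [h1]
  by_cases h2 : raw = "USDCUSDT"
  · simp [h2]
  rw [if_neg h1, if_neg h2, if_neg h1, if_neg h2]
  rw [show PySem.Str.len raw = (raw.toList.length : Int) from PySem.Str.len_eq raw]
  rw [convertLoopA_closed]
  by_cases h5 : 5 ≤ raw.toList.length
  · rw [if_pos h5, if_pos (by exact_mod_cast h5)]
    rw [PySem.List.slice_to_neg_ofNat raw.toList 2 (by omega),
        PySem.List.slice_from_neg_ofNat raw.toList 2 (by omega)]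
  · rw [if_neg h5, if_neg (by intro h; exact h5 (by exact_mod_cast h))]
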